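-- pv_equiv track=rewrite | github.com/charanbadampudi/Resume-Screening-Matching-Application | models/skill_extractor.py | extract_skill_levels
-- ===== SOURCE A (Python) =====
-- from typing import List, Set, Dict, Tuple, Optional
--
-- def extract_skill_levels(text: str, skills: Set[str]) -> Dict[str, str]:
--     """
--     Extract proficiency levels for skills (beginner, intermediate, advanced)
--     """
--     skill_levels = {}
--     text_lower = text.lower()
--
--     level_patterns = {
--         'advanced': ['advanced', 'expert', 'proficient', 'senior', 'lead', 'principal'],
--         'intermediate': ['intermediate', 'medium', 'working knowledge', 'familiar'],
--         'beginner': ['beginner', 'basic', 'fundamental', 'learning', 'junior']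
--     }
--
--     for skill in skills:
--         # Look for skill near level indicators
--         skill_index = text_lower.find(skill.lower())
--         if skill_index != -1:
--             # Check surrounding context (100 characters before and after)
--             start = max(0, skill_index - 100)
--             end = min(len(text_lower), skill_index + len(skill) + 100)
--             context = text_lower[start:end]
--
--             # Determine level
--             level = 'unknown'
--             for lvl, patterns in level_patterns.items():
--                 if any(pattern in context for pattern in patterns):
--                     level = lvl
--                     break
--
--             skill_levels[skill] = level
--
--     return skill_levels
-- ===== SOURCE B (Python) =====
-- def extract_skill_levels(text, skills):
--     """Same result as A: precompute every level-pattern's match positions in the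
--     whole text once, then classify each skill's context window by interval
--     checks on those position lists instead of slicing the window and
--     substring-scanning it for every pattern per skill."""
--     text_lower = text.lower()
--     n = len(text_lower)
--     level_patterns = [
--         ('advanced', ['advanced', 'expert', 'proficient', 'senior', 'lead', 'principal']),
--         ('intermediate', ['intermediate', 'medium', 'working knowledge', 'familiar']),
--         ('beginner', ['beginner', 'basic', 'fundamental', 'learning', 'junior']),
--     ]
--     # all match positions of each pattern, computed once over the whole text
--     occ = [(lvl, [(p, [j for j in range(n - len(p) + 1)
--                        if text_lower[j:j + len(p)] == p])
--                   for p in pats])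
--            for lvl, pats in level_patterns]
--     skill_levels = {}
--     for skill in skills:
--         i = text_lower.find(skill.lower())
--         if i != -1:
--             start = i - 100 if i > 100 else 0
--             end = min(n, i + len(skill) + 100)
--             skill_levels[skill] = next(
--                 (lvl for lvl, pocc in occ
--                  if any(start <= j and j + len(p) <= end
--                         for p, poss in pocc for j in poss)),
--                 'unknown')
--     return skill_levels
-- ===== Notes on version B (the rewrite author's own statement) =====
-- stated objective: alternative
-- what changed: B precomputes every level-pattern's match positions in the lowered text once and classifies each skill's context by interval checks on those position lists, instead of slicing a context window and substring-scanning it for every pattern per skill.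
import Mathlib
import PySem

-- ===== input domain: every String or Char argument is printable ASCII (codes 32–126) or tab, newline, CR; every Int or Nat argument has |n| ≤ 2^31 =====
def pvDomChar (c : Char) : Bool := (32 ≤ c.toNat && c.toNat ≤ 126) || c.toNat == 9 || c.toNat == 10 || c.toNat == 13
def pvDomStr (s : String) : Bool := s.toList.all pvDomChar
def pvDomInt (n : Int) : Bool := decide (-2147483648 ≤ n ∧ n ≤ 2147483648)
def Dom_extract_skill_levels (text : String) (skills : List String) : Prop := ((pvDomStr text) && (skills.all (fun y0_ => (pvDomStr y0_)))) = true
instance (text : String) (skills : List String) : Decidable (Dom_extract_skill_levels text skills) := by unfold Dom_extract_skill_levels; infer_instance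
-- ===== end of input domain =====

-- B classifies each skill's context window by interval checks against the level patterns'
-- precomputed match positions in the whole text, instead of slicing the window and
-- substring-scanning it for every pattern per skill; objective: alternative algorithm.

-- ===== PORT A =====
-- the level_patterns dict (only iterated, so an association list in insertion order)
def levelPatternsA : List (String × List String) :=
  [("advanced", ["advanced", "expert", "proficient", "senior", "lead", "principal"]),
   ("intermediate", ["intermediate", "medium", "working knowledge", "familiar"]),
   ("beginner", ["beginner", "basic", "fundamental", "learning", "junior"])]

-- 'level = unknown; for lvl, patterns in …: if any(pattern in context …): level = lvl; break'
def levelLoopA (ctx : List Char) : List (String × List String) → String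
  | [] => "unknown"
  | (lvl, pats) :: rest =>
    if pats.any (fun p => PySem.Chars.isIn p.toList ctx) then lvl
    else levelLoopA ctx rest

def extract_skill_levels (text : String) (skills : List String) : List (String × String) :=
  let tl := PySem.Chars.lower text.toList
  (skills.foldl (fun (d : PySem.Dict String String) skill =>
    let idx := PySem.Chars.find tl (PySem.Chars.lower skill.toList)
    if idx ≠ -1 then
      let s := max 0 (idx - 100)
      let e := min (tl.length : Int) (idx + skill.toList.length + 100)
      let ctx := PySem.List.slice tl (some s) (some e)
      d.insert skill (levelLoopA ctx levelPatternsA)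
    else d) ⟨[]⟩).items

-- ===== PORT B =====
def levelPatternsB : List (String × List String) :=
  [("advanced", ["advanced", "expert", "proficient", "senior", "lead", "principal"]),
   ("intermediate", ["intermediate", "medium", "working knowledge", "familiar"]),
   ("beginner", ["beginner", "basic", "fundamental", "learning", "junior"])]

-- '[j for j in range(n - len(p) + 1) if text_lower[j:j+len(p)] == p]'
def occListB (tl p : List Char) : List Int :=
  (PySem.List.pyRange 0 ((tl.length : Int) - p.length + 1)).filter
    (fun j => PySem.List.slice tl (some j) (some (j + p.length)) == p)

-- the 'occ' comprehension: per level, each pattern with its match positions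
def occTableB (tl : List Char) : List (String × List (List Char × List Int)) :=
  levelPatternsB.map (fun lp => (lp.1, lp.2.map (fun p => (p.toList, occListB tl p.toList))))

-- 'next((lvl for lvl, pocc in occ if any(start <= j and j + len(p) <= end …)), "unknown")'
def levelLoopB (s e : Int) : List (String × List (List Char × List Int)) → String
  | [] => "unknown"
  | (lvl, pocc) :: rest =>
    if pocc.any (fun po => po.2.any (fun j =>
        decide (s ≤ j) && decide (j + (po.1.length : Int) ≤ e))) then lvl
    else levelLoopB s e rest

def extract_skill_levels_alt (text : String) (skills : List String) : List (String × String) :=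
  let tl := PySem.Chars.lower text.toList
  let occ := occTableB tl
  (skills.foldl (fun (d : PySem.Dict String String) skill =>
    let i := PySem.Chars.find tl (PySem.Chars.lower skill.toList)
    if i ≠ -1 then
      let s := if i > 100 then i - 100 else 0
      let e := min (tl.length : Int) (i + skill.toList.length + 100)
      d.insert skill (levelLoopB s e occ)
    else d) ⟨[]⟩).items

-- ===== PRECONDITION & SPEC =====
def Spec_extract_skill_levels (text : String) (skills : List String) (out : List (String × String)) : Prop := out = extract_skill_levels_alt text skills
instance (text : String) (skills : List String) (out : List (String × String)) : Decidable (Spec_extract_skill_levels text skills out) := by unfold Spec_extract_skill_levels; infer_instance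

-- ===== CLAIM (what is proved, stated in full; the proofs are below) =====
def Claim_equal_extract_skill_levels : Prop := ∀ (text : String) (skills : List String), Dom_extract_skill_levels text skills → Spec_extract_skill_levels text skills (extract_skill_levels text skills)

-- ===== LEMMAS AND PROOFS =====

-- membership in B's precomputed position list = a genuine match position
lemma mem_occListB (tl p : List Char) (j : Int) :
    j ∈ occListB tl p ↔ 0 ≤ j ∧ j.toNat + p.length ≤ tl.length ∧ p <+: tl.drop j.toNat := by
  unfold occListB
  simp only [List.mem_filter, PySem.List.mem_pyRange_one, beq_iff_eq]
  constructor
  · rintro ⟨⟨h0, hlt⟩, hsl⟩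
    refine ⟨h0, by omega, ?_⟩
    rw [PySem.List.slice_toNat _ h0 (by omega),
        show ((j + (p.length : Int)).toNat - j.toNat = p.length) by omega] at hsl
    exact List.prefix_iff_eq_take.mpr hsl.symm
  · rintro ⟨h0, hjn, hpre⟩
    refine ⟨⟨h0, by omega⟩, ?_⟩
    rw [PySem.List.slice_toNat _ h0 (by omega),
        show ((j + (p.length : Int)).toNat - j.toNat = p.length) by omega]
    exact (List.prefix_iff_eq_take.mp hpre).symm

-- per-pattern: 'p in context-window' = some precomputed position of p lies in the window
lemma isIn_slice_eq (tl p : List Char) (hp : p ≠ []) (s e : Int)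
    (h0 : 0 ≤ s) (h1 : s ≤ e) (h2 : e ≤ (tl.length : Int)) :
    PySem.Chars.isIn p (PySem.List.slice tl (some s) (some e))
      = (occListB tl p).any (fun j => decide (s ≤ j) && decide (j + (p.length : Int) ≤ e)) := by
  have hp1 : 0 < p.length := List.length_pos_iff.mpr hp
  rw [Bool.eq_iff_iff]
  rw [PySem.List.slice_toNat _ h0 (by omega)]
  constructor
  · intro h
    obtain ⟨j', hpre⟩ := (PySem.Chars.exists_prefix_drop_iff_isIn p _).mpr h
    rw [List.drop_take, List.drop_drop] at hpre
    obtain ⟨hpre', hplen⟩ := List.prefix_take_iff.mp hpre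
    refine List.any_eq_true.mpr ⟨((s.toNat + j' : Nat) : Int), ?_, ?_⟩
    · exact (mem_occListB tl p _).mpr ⟨by omega, by omega, by rw [show ((((s.toNat + j' : Nat) : Int)).toNat = s.toNat + j') by omega]; exact hpre'⟩
    · simp only [Bool.and_eq_true, decide_eq_true_eq]
      constructor <;> [omega; omega]
  · intro h
    obtain ⟨j, hjmem, hcond⟩ := List.any_eq_true.mp h
    rw [mem_occListB] at hjmem
    obtain ⟨hj0, hjn, hpre⟩ := hjmem
    simp only [Bool.and_eq_true, decide_eq_true_eq] at hcond
    apply (PySem.Chars.exists_prefix_drop_iff_isIn p _).mp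
    refine ⟨j.toNat - s.toNat, ?_⟩
    rw [List.drop_take, List.drop_drop,
        show (s.toNat + (j.toNat - s.toNat) = j.toNat) by omega]
    exact List.prefix_take_iff.mpr ⟨hpre, by omega⟩

lemma loop_eq (tl : List Char) (s e : Int) (h0 : 0 ≤ s) (h1 : s ≤ e) (h2 : e ≤ (tl.length : Int))
    (L : List (String × List String)) (hL : ∀ x ∈ L, ∀ p ∈ x.2, p.toList ≠ []) :
    levelLoopA (PySem.List.slice tl (some s) (some e)) L
      = levelLoopB s e (L.map (fun lp => (lp.1, lp.2.map (fun p => (p.toList, occListB tl p.toList))))) := by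
  induction L with
  | nil => rfl
  | cons x rest ih =>
    obtain ⟨lvl, pats⟩ := x
    simp only [List.map_cons, levelLoopA, levelLoopB]
    have hany : pats.any (fun p => PySem.Chars.isIn p.toList (PySem.List.slice tl (some s) (some e)))
        = (pats.map (fun p => (p.toList, occListB tl p.toList))).any
            (fun po => po.2.any (fun j => decide (s ≤ j) && decide (j + (po.1.length : Int) ≤ e))) := by
      rw [List.any_map]
      apply PySem.List.any_congr_mem
      intro p hp
      exact isIn_slice_eq tl p.toList (hL (lvl, pats) (by simp) p hp) s e h0 h1 h2
    rw [hany]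
    split
    · rfl
    · exact ih (fun x hx => hL x (List.mem_cons_of_mem _ hx))

lemma classify_eq (tl : List Char) (s e : Int) (h0 : 0 ≤ s) (h1 : s ≤ e) (h2 : e ≤ (tl.length : Int)) :
    levelLoopA (PySem.List.slice tl (some s) (some e)) levelPatternsA
      = levelLoopB s e (occTableB tl) := by
  have := loop_eq tl s e h0 h1 h2 levelPatternsB (by decide)
  simpa [occTableB, levelPatternsA, levelPatternsB] using this

lemma fold_eq (tl : List Char) (skills : List String) (d : PySem.Dict String String) :
    skills.foldl (fun (d : PySem.Dict String String) skill =>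
      let idx := PySem.Chars.find tl (PySem.Chars.lower skill.toList)
      if idx ≠ -1 then
        let s := max 0 (idx - 100)
        let e := min (tl.length : Int) (idx + skill.toList.length + 100)
        let ctx := PySem.List.slice tl (some s) (some e)
        d.insert skill (levelLoopA ctx levelPatternsA)
      else d) d
    = skills.foldl (fun (d : PySem.Dict String String) skill =>
      let i := PySem.Chars.find tl (PySem.Chars.lower skill.toList)
      if i ≠ -1 then
        let s := if i > 100 then i - 100 else 0
        let e := min (tl.length : Int) (i + skill.toList.length + 100)
        d.insert skill (levelLoopB s e (occTableB tl))
      else d) d := by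
  induction skills generalizing d with
  | nil => rfl
  | cons sk rest ih =>
    simp only [List.foldl_cons]
    rw [ih]
    congr 1
    have hge := PySem.Chars.neg_one_le_find tl (PySem.Chars.lower sk.toList)
    have hle := PySem.Chars.find_le_length tl (PySem.Chars.lower sk.toList)
    simp only [ne_eq]
    by_cases h : PySem.Chars.find tl (PySem.Chars.lower sk.toList) = -1
    · simp [h]
    · simp only [h, not_false_eq_true, if_true]
      congr 1
      rw [show ((if PySem.Chars.find tl (PySem.Chars.lower sk.toList) > 100 then
            PySem.Chars.find tl (PySem.Chars.lower sk.toList) - 100 else 0)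
          = max 0 (PySem.Chars.find tl (PySem.Chars.lower sk.toList) - 100)) by split <;> omega]
      exact classify_eq tl _ _ (le_max_left _ _) (by omega) (min_le_left _ _)

-- ===== VERDICT (by name: the statement is the Claim_ definition above) =====
theorem extract_skill_levels_spec : Claim_equal_extract_skill_levels := by
  intro text skills _
  exact congrArg PySem.Dict.items (fold_eq (PySem.Chars.lower text.toList) skills ⟨[]⟩)
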